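-- pv_equiv track=rewrite | github.com/827915432/Latex2Word | src/latex-to-word/scripts/precheck.py | strip_latex_comments
-- ===== SOURCE A (Python) =====
-- def strip_latex_comments(text: str) -> str:
--     """
--     移除 LaTeX 注释，同时尽量保留原始行号结构。
--
--     实现策略：
--     - 按行处理；
--     - 删除未被反斜杠转义的 '%' 之后的内容；
--     - 保留换行符数量，便于后续 match 偏移映射回近似行号。
--
--     注意：
--     - 该实现是工程预检查级别的近似处理，不是完整的 TeX 词法分析器；
--     - 对 verbatim / minted 一类环境中的 '%'，理论上不应视为注释；
--       但在预检查阶段，这种近似通常足够且可接受。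
--     """
--     stripped_lines: list[str] = []
--     for line in text.splitlines():
--         cut_index = None
--         escaped = False
--         for idx, ch in enumerate(line):
--             if ch == "\\":
--                 escaped = not escaped
--                 continue
--             if ch == "%" and not escaped:
--                 cut_index = idx
--                 break
--             escaped = False
--         if cut_index is not None:
--             stripped_lines.append(line[:cut_index])
--         else:
--             stripped_lines.append(line)
--     return "\n".join(stripped_lines)
-- ===== SOURCE B (Python) =====
-- def strip_latex_comments(text: str) -> str:
--     stripped_lines = []
--     for line in text.splitlines():
--         parts = line.split('%')
--         kept = parts[0]
--         for part in parts[1:]: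
--             n = len(kept) - len(kept.rstrip('\\'))
--             if n % 2 == 0:
--                 break
--             kept = kept + '%' + part
--         stripped_lines.append(kept)
--     return '\n'.join(stripped_lines)
-- ===== Notes on version B (the rewrite author's own statement) =====
-- stated objective: faster
-- what changed: Replaces A's per-character escape-toggle scan of each line by splitting the line at percent signs and rejoining chunks while the kept prefix ends in an odd run of backslashes (trailing-run parity via rstrip), so no character-level state machine remains.
import Mathlib
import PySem

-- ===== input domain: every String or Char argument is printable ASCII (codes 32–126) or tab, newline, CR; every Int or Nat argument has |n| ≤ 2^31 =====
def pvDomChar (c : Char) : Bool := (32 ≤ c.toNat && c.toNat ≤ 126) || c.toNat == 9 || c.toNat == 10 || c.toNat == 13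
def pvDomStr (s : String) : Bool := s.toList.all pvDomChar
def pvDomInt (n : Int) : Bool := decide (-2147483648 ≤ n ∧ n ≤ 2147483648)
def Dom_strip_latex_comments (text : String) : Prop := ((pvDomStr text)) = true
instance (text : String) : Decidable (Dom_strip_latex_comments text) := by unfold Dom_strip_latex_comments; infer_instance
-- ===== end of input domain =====

-- B replaces A's per-character escape-toggle scan by splitting each line at percent
-- signs and rejoining while the kept prefix ends in an odd backslash run; the timing
-- run measured B faster by a constant factor (same O(n) cost).

-- ===== PORT A =====
-- inner loop of A: scan with the 'escaped' toggle, returning cut_index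
def aCut : List Char → Bool → Nat → Option Nat
  | [], _, _ => none
  | ch :: rest, escaped, idx =>
    if ch = '\\' then aCut rest (!escaped) (idx + 1)
    else if ch = '%' ∧ escaped = false then some idx
    else aCut rest false (idx + 1)

-- one iteration of A's outer loop: line[:cut_index] if cut, else line
def aLine (line : List Char) : List Char :=
  match aCut line false 0 with
  | some i => PySem.List.slice line none (some (i : Int))
  | none => line

def strip_latex_comments (text : String) : String :=
  String.ofList (PySem.Chars.join ['\n'] ((PySem.Chars.splitlines text.toList).map aLine))

-- ===== PORT B =====
-- kept.rstrip('\\')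
def rstripBS (cs : List Char) : List Char := (cs.reverse.dropWhile (fun c => c == '\\')).reverse

-- B's inner loop: extend kept with '%' + part while kept ends in an odd backslash run
def bJoinParts : List Char → List (List Char) → List Char
  | kept, [] => kept
  | kept, p :: ps =>
    if (kept.length - (rstripBS kept).length) % 2 == 0 then kept
    else bJoinParts (kept ++ '%' :: p) ps

def bLine (line : List Char) : List Char :=
  match PySem.Chars.splitOn line ['%'] with
  | [] => []   -- unreachable: split never returns an empty list
  | p :: ps => bJoinParts p ps

def strip_latex_comments_alt (text : String) : String :=
  String.ofList (PySem.Chars.join ['\n'] ((PySem.Chars.splitlines text.toList).map bLine))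

-- ===== PRECONDITION & SPEC =====
def Spec_strip_latex_comments (text : String) (out : String) : Prop := out = strip_latex_comments_alt text
instance (text : String) (out : String) : Decidable (Spec_strip_latex_comments text out) := by unfold Spec_strip_latex_comments; infer_instance

-- ===== CLAIM (what is proved, stated in full; the proofs are below) =====
def Claim_equal_strip_latex_comments : Prop := ∀ (text : String), Dom_strip_latex_comments text → Spec_strip_latex_comments text (strip_latex_comments text)

-- ===== LEMMAS AND PROOFS =====

-- structural version of line.split('%')
def mySplit : List Char → List (List Char)
  | [] => [[]]
  | c :: rest =>
    if c = '%' then [] :: mySplit rest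
    else match mySplit rest with
      | [] => [[c]]
      | p :: ps => (c :: p) :: ps

theorem mySplit_ne_nil (cs : List Char) : mySplit cs ≠ [] := by
  cases cs with
  | nil => simp [mySplit]
  | cons c rest =>
    simp only [mySplit]
    split <;> [skip; split] <;> simp

theorem go_eq_mySplit (l : List Char) : ∀ (fuel : Nat) (cur : List Char) (acc : List (List Char)),
    l.length + 1 ≤ fuel →
    PySem.Chars.splitOn.go ['%'] fuel l cur acc =
      acc.reverse ++ (cur.reverse ++ (mySplit l).headI) :: (mySplit l).tail := by
  induction l with
  | nil =>
    intro fuel cur acc h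
    obtain ⟨f, rfl⟩ : ∃ f, fuel = f + 1 := ⟨fuel - 1, by omega⟩
    rw [PySem.Chars.splitOn.go]
    simp [mySplit]
    omega
  | cons c rest ih =>
    intro fuel cur acc h
    obtain ⟨f, rfl⟩ : ∃ f, fuel = f + 1 := ⟨fuel - 1, by omega⟩
    rw [PySem.Chars.splitOn.go]
    by_cases hc : c = '%'
    · subst hc
      have hpre : List.isPrefixOf ['%'] ('%' :: rest) = true := by
        simp [List.isPrefixOf]
      simp only [hpre, if_pos, List.length_cons, List.length_nil, List.drop_succ_cons,
        List.drop_zero]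
      rw [ih f [] ((cur.reverse) :: acc) (by simp at h ⊢; omega)]
      have hne := mySplit_ne_nil rest
      simp only [mySplit]
      match hm : mySplit rest, hne with
      | p :: ps, _ => simp
    · have hpre : List.isPrefixOf ['%'] (c :: rest) = false := by
        simp only [List.isPrefixOf, Bool.and_true]
        exact decide_eq_false (fun hh => hc hh.symm)
      simp only [hpre, Bool.false_eq_true, if_false]
      rw [ih f (c :: cur) acc (by simp at h ⊢; omega)]
      have hne := mySplit_ne_nil rest
      simp only [mySplit, hc, if_false]
      match hm : mySplit rest, hne with
      | p :: ps, _ => simp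

theorem splitOn_eq_mySplit (cs : List Char) : PySem.Chars.splitOn cs ['%'] = mySplit cs := by
  have h := go_eq_mySplit cs (cs.length + 1) [] [] (le_refl _)
  have hne := mySplit_ne_nil cs
  rw [PySem.Chars.splitOn]
  rw [h]
  match hm : mySplit cs, hne with
  | p :: ps, _ => simp

theorem mySplit_no_pct {a : List Char} (h : '%' ∉ a) : mySplit a = [a] := by
  induction a with
  | nil => simp [mySplit]
  | cons c rest ih =>
    simp only [List.mem_cons, not_or] at h
    simp [mySplit, Ne.symm h.1, ih h.2]

theorem mySplit_append {a : List Char} (b : List Char) (h : '%' ∉ a) :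
    mySplit (a ++ '%' :: b) = a :: mySplit b := by
  induction a with
  | nil => simp [mySplit]
  | cons c rest ih =>
    simp only [List.mem_cons, not_or] at h
    simp only [List.cons_append, mySplit, Ne.symm h.1, if_false, ih h.2]

-- every string with a '%' splits as a ++ '%' :: b with '%'-free a
theorem exists_pct_split {cs : List Char} (h : '%' ∈ cs) :
    ∃ a b, cs = a ++ '%' :: b ∧ '%' ∉ a := by
  induction cs with
  | nil => cases h
  | cons c rest ih =>
    by_cases hc : c = '%'
    · exact ⟨[], rest, by simp [hc], by simp⟩
    · have : '%' ∈ rest := by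
        rcases List.mem_cons.mp h with h1 | h1
        · exact absurd h1.symm hc
        · exact h1
      obtain ⟨a, b, hab, hna⟩ := ih this
      refine ⟨c :: a, b, by simp [hab], ?_⟩
      simp only [List.mem_cons, not_or]
      exact ⟨fun hh => hc hh.symm, hna⟩

-- escaped-state after A scans a '%'-free prefix
def escAfter : List Char → Bool → Bool
  | [], e => e
  | c :: rest, e => escAfter rest (if c = '\\' then !e else false)

theorem aCut_append {a : List Char} (b : List Char) (h : '%' ∉ a) :
    ∀ (esc : Bool) (idx : Nat), aCut (a ++ b) esc idx = aCut b (escAfter a esc) (idx + a.length) := by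
  induction a with
  | nil => intro esc idx; simp [escAfter]
  | cons c rest ih =>
    intro esc idx
    simp only [List.mem_cons, not_or] at h
    rw [show idx + (c :: rest).length = idx + 1 + rest.length from by
      simp only [List.length_cons]; omega]
    by_cases hc : c = '\\'
    · have hstep : aCut (c :: (rest ++ b)) esc idx = aCut (rest ++ b) (!esc) (idx + 1) := by
        simp [aCut, hc]
      rw [List.cons_append, hstep, ih h.2]
      simp [escAfter, hc]
    · have hstep : aCut (c :: (rest ++ b)) esc idx = aCut (rest ++ b) false (idx + 1) := by
        simp only [aCut]
        rw [if_neg hc, if_neg (by intro hp; exact h.1 hp.1.symm)]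
      rw [List.cons_append, hstep, ih h.2]
      simp [escAfter, hc]

-- trailing-backslash-run length
def tc (cs : List Char) : Nat := (cs.reverse.takeWhile (fun c => c == '\\')).length

theorem rstrip_len (cs : List Char) : cs.length - (rstripBS cs).length = tc cs := by
  have h2 := congrArg List.length
    (List.takeWhile_append_dropWhile (p := fun c => c == '\\') (l := cs.reverse))
  simp only [List.length_append, List.length_reverse] at h2
  simp only [rstripBS, tc, List.length_reverse]
  omega

theorem escAfter_append (xs ys : List Char) : ∀ e, escAfter (xs ++ ys) e = escAfter ys (escAfter xs e) := by
  induction xs with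
  | nil => intro e; simp [escAfter]
  | cons c rest ih => intro e; simp [escAfter, ih]

theorem escAfter_false (a : List Char) : escAfter a false = decide (tc a % 2 = 1) := by
  induction a using List.reverseRecOn with
  | nil => simp [escAfter, tc]
  | append_singleton xs c ih =>
    rw [escAfter_append, ih]
    by_cases hc : c = '\\'
    · subst hc
      have htc : tc (xs ++ ['\\']) = tc xs + 1 := by
        simp [tc]
      rw [htc]
      simp only [escAfter]
      rcases Nat.mod_two_eq_zero_or_one (tc xs) with h | h <;>
        simp [h, Nat.add_mod]
    · have htc : tc (xs ++ [c]) = 0 := by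
        simp [tc, hc]
      rw [htc]
      simp [escAfter, hc]

theorem tc_append_cons {c : Char} (hc : c ≠ '\\') (xs ys : List Char) :
    tc (xs ++ c :: ys) = tc ys := by
  have hnil : List.takeWhile (fun c => c == '\\') (c :: xs.reverse) = [] := by
    simp [hc]
  simp only [tc, List.reverse_append, List.reverse_cons, List.append_assoc,
    List.singleton_append]
  rw [List.takeWhile_append]
  split
  · next hlen => simp [hnil, hlen]
  · rfl

theorem bJoinParts_shift (t : List (List Char)) : ∀ (h pre : List Char),
    bJoinParts (pre ++ '%' :: h) t = pre ++ '%' :: bJoinParts h t := by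
  induction t with
  | nil => intro h pre; simp [bJoinParts]
  | cons p ps ih =>
    intro h pre
    simp only [bJoinParts, rstrip_len, tc_append_cons (by decide : ('%' : Char) ≠ '\\')]
    split
    · rfl
    · simpa [List.append_assoc] using ih (h ++ '%' :: p) pre

-- A's cut index is position-shift equivariant
theorem aCut_shift (l : List Char) : ∀ (esc : Bool) (idx : Nat),
    aCut l esc idx = (aCut l esc 0).map (· + idx) := by
  induction l with
  | nil => intro esc idx; simp [aCut]
  | cons c rest ih =>
    intro esc idx
    simp only [aCut]
    split
    · rw [ih _ (idx + 1), ih _ 1, Option.map_map]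
      congr 1
      funext x
      simp [Nat.add_comm, Nat.add_left_comm]
    · split
      · simp
      · rw [ih false (idx + 1), ih false 1, Option.map_map]
        congr 1
        funext x
        simp [Nat.add_comm, Nat.add_left_comm]

theorem aLine_eq_bLine (cs : List Char) : aLine cs = bLine cs := by
  generalize hn : cs.length = n
  induction n using Nat.strong_induction_on generalizing cs with
  | _ n ih =>
    by_cases hmem : '%' ∈ cs
    · obtain ⟨a, b, rfl, hna⟩ := exists_pct_split hmem
      have h1 : aCut (a ++ '%' :: b) false 0 = aCut ('%' :: b) (escAfter a false) a.length := by
        simpa using aCut_append ('%' :: b) hna false 0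
      rw [escAfter_false] at h1
      have hsplit : PySem.Chars.splitOn (a ++ '%' :: b) ['%'] = a :: mySplit b := by
        rw [splitOn_eq_mySplit, mySplit_append b hna]
      have hb2 : mySplit b ≠ [] := mySplit_ne_nil b
      rcases Nat.mod_two_eq_zero_or_one (tc a) with hp | hp
      · -- even trailing run: A cuts at a.length, B stops at the first part
        have hA : aLine (a ++ '%' :: b) = a := by
          have hc2 : aCut ('%' :: b) false a.length = some a.length := by
            simp [aCut]
          rw [aLine, h1]
          have hdec : decide (tc a % 2 = 1) = false := by simp [hp]
          rw [hdec, hc2]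
          simp [pysem]
        have hB : bLine (a ++ '%' :: b) = a := by
          rw [bLine]
          rw [hsplit]
          match hm : mySplit b, hb2 with
          | q :: qs, _ =>
            simp [bJoinParts, rstrip_len, hp]
        rw [hA, hB]
      · -- odd trailing run: the '%' is escaped, both recurse into b
        have hble : b.length < n := by
          subst hn; simp; omega
        have hIH := ih b.length (by omega) b rfl
        have hA : aLine (a ++ '%' :: b) = a ++ '%' :: aLine b := by
          have hc2 : aCut ('%' :: b) true a.length = aCut b false (a.length + 1) := by
            simp [aCut]
          rw [aLine, aLine, h1]
          have hdec : decide (tc a % 2 = 1) = true := by simp [hp]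
          rw [hdec, hc2, aCut_shift b false (a.length + 1)]
          cases hj : aCut b false 0 with
          | none => simp
          | some j =>
            simp only [Option.map_some]
            have htake : (a ++ '%' :: b).take (j + (a.length + 1)) = a ++ '%' :: b.take j := by
              rw [List.take_append, List.take_of_length_le (by omega)]
              have : j + (a.length + 1) - a.length = j + 1 := by omega
              rw [this]
              simp
            rw [PySem.List.slice_to _ (by positivity)]
            rw [Int.toNat_natCast, htake, PySem.List.slice_to _ (by positivity),
              Int.toNat_natCast]
        have hB : bLine (a ++ '%' :: b) = a ++ '%' :: bLine b := by
          rw [bLine, bLine, hsplit, splitOn_eq_mySplit]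
          match hm : mySplit b, hb2 with
          | q :: qs, _ =>
            simp only [bJoinParts, rstrip_len, hp]
            rw [if_neg (by simp)]
            simpa [List.append_assoc] using bJoinParts_shift qs q a
        rw [hA, hB, hIH]
    · have ha : aCut cs false 0 = none := by
        have := aCut_append (a := cs) [] hmem false 0
        simpa [aCut] using this
      have hb : bLine cs = cs := by
        rw [bLine, splitOn_eq_mySplit, mySplit_no_pct hmem]
        rfl
      simp [aLine, ha, hb]

-- ===== VERDICT (by name: the statement is the Claim_ definition above) =====
theorem strip_latex_comments_spec : Claim_equal_strip_latex_comments := by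
  intro text _
  unfold Spec_strip_latex_comments strip_latex_comments strip_latex_comments_alt
  congr 1
  congr 1
  exact List.map_congr_left (fun l _ => aLine_eq_bLine l)
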